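-- pv_equiv track=rewrite | github.com/de-algorithm/coding-test-study | joyunji/week20/수_묶기.py | solution
-- ===== SOURCE A (Python) =====
-- def solution(n, series):
-- 	positive = [e for e in series if e > 1]
-- 	positive.sort(reverse=True)
-- 	negative = [e for e in series if e <= 0]
-- 	negative.sort()
-- 	cnt_one = series.count(1)
-- 	answer = cnt_one
-- 	for i in range(0, len(positive)-1, 2):
-- 		answer += positive[i] * positive[i+1]
-- 	if len(positive)%2 == 1:
-- 		answer += positive[-1]
--
-- 	for i in range(0, len(negative)-1, 2):
-- 		answer += negative[i]*negative[i+1]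
-- 	if len(negative)%2 == 1:
-- 		answer += negative[-1]
--
-- 	return answer
-- ===== SOURCE B (Python) =====
-- def solution(n, series):
--     # selection-based: never sorts; repeatedly extracts the two extreme
--     # elements with built-in max/min and pairs them off
--     def pair_up(xs, use_max):
--         total = 0
--         while len(xs) >= 2:
--             pick = max if use_max else min
--             a = pick(xs)
--             xs.remove(a)
--             b = pick(xs)
--             xs.remove(b)
--             total += a * b
--         return total + (xs[0] if xs else 0)
--
--     pos = [e for e in series if e > 1]
--     neg = [e for e in series if e <= 0]
--     return series.count(1) + pair_up(pos, True) + pair_up(neg, False)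
-- ===== Notes on version B (the rewrite author's own statement) =====
-- stated objective: alternative
-- what changed: B never sorts: instead of building two sorted lists and walking them by index pairs, it repeatedly extracts the current extreme element with built-in max/min and removes it, pairing off the two extremes of each class until at most one remains; it trades A's O(n log n) sort for selection.
import Mathlib
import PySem

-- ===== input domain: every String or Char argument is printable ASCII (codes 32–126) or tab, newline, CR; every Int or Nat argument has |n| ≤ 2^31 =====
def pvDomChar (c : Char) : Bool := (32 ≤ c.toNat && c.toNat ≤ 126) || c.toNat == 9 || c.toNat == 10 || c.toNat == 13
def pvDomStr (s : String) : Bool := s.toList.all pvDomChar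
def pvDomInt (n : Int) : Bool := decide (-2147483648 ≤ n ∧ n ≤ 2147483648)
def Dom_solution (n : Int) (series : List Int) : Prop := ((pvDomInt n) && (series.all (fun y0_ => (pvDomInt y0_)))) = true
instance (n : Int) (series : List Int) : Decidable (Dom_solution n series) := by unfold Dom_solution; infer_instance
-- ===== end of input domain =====

-- B is selection-based: it never sorts, repeatedly extracting the extreme element with max/min and remove; alternative algorithm, not faster.

-- ===== PORT A =====
def solution (n : Int) (series : List Int) : Int :=
  let positive := PySem.List.sorted (series.filter (fun e => decide (1 < e))) (fun x => x) true
  let negative := PySem.List.sorted (series.filter (fun e => decide (e ≤ 0))) (fun x => x) false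
  let cnt_one : Int := (series.count 1 : Int)
  let answer := cnt_one
  let answer := (PySem.List.pyRange 0 ((positive.length : Int) - 1) 2).foldl
      (fun acc i => acc + PySem.List.pyGetD positive i 0 * PySem.List.pyGetD positive (i + 1) 0) answer
  let answer := if positive.length % 2 == 1 then answer + PySem.List.pyGetD positive (-1) 0 else answer
  let answer := (PySem.List.pyRange 0 ((negative.length : Int) - 1) 2).foldl
      (fun acc i => acc + PySem.List.pyGetD negative i 0 * PySem.List.pyGetD negative (i + 1) 0) answer
  let answer := if negative.length % 2 == 1 then answer + PySem.List.pyGetD negative (-1) 0 else answer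
  answer

-- ===== PORT B =====
-- pick(xs) for pick = max if use_max else min (Python max/min: the first extremal element)
def pickExtreme (useMax : Bool) (xs : List Int) : Int :=
  (if useMax then PySem.List.max? xs (fun x => x) else PySem.List.min? xs (fun x => x)).getD 0

theorem pickExtreme_mem (useMax : Bool) (xs : List Int) (h : xs ≠ []) : pickExtreme useMax xs ∈ xs := by
  unfold pickExtreme
  cases useMax
  · rcases hm : PySem.List.min? xs (fun x => x) with _ | m
    · exact absurd ((PySem.List.min?_eq_none_iff xs (fun x => x)).mp hm) h
    · simpa using PySem.List.min?_mem hm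
  · rcases hm : PySem.List.max? xs (fun x => x) with _ | m
    · exact absurd ((PySem.List.max?_eq_none_iff xs (fun x => x)).mp hm) h
    · simpa using PySem.List.max?_mem hm

theorem removeGetD_len (xs : List Int) (a : Int) (ha : a ∈ xs) :
    ((PySem.List.remove? xs a).getD []).length + 1 = xs.length := by
  rw [PySem.List.remove?_eq_some_erase xs a ha]
  have h0 : 0 < xs.length := List.length_pos_of_mem ha
  have h1 := List.length_erase_of_mem ha
  simp only [Option.getD_some]
  omega

-- the 'while len(xs) >= 2' loop of pair_up, accumulating into total
def pairUp (useMax : Bool) (total : Int) (xs : List Int) : Int :=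
  if h : 2 ≤ xs.length then
    let a := pickExtreme useMax xs
    let xs1 := (PySem.List.remove? xs a).getD []
    let b := pickExtreme useMax xs1
    let xs2 := (PySem.List.remove? xs1 b).getD []
    pairUp useMax (total + a * b) xs2
  else total + (if xs.isEmpty then 0 else PySem.List.pyGetD xs 0 0)
termination_by xs.length
decreasing_by
  have hne : xs ≠ [] := by intro he; rw [he] at h; simp at h
  have h1 := removeGetD_len xs _ (pickExtreme_mem useMax xs hne)
  have hne1 : (PySem.List.remove? xs (pickExtreme useMax xs)).getD [] ≠ [] := by
    intro he; rw [he] at h1; simp at h1; omega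
  have h2 := removeGetD_len _ _ (pickExtreme_mem useMax _ hne1)
  omega

def solution_alt (n : Int) (series : List Int) : Int :=
  let pos := series.filter (fun e => decide (1 < e))
  let neg := series.filter (fun e => decide (e ≤ 0))
  (series.count 1 : Int) + pairUp true 0 pos + pairUp false 0 neg

-- ===== PRECONDITION & SPEC =====
def Spec_solution (n : Int) (series : List Int) (out : Int) : Prop := out = solution_alt n series
instance (n : Int) (series : List Int) (out : Int) : Decidable (Spec_solution n series out) := by unfold Spec_solution; infer_instance

-- ===== CLAIM (what is proved, stated in full; the proofs are below) =====
def Claim_equal_solution : Prop := ∀ (n : Int) (series : List Int), Dom_solution n series → Spec_solution n series (solution n series)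

-- ===== LEMMAS AND PROOFS =====

-- pair sum with the odd leftover added
def pairf : List Int → Int
  | [] => 0
  | [x] => x
  | x :: y :: t => x * y + pairf t

theorem pyGetD_getD {α : Type} (xs : List α) (i : Int) (d : α) :
    PySem.List.pyGetD xs i d = (PySem.List.pyGet? xs i).getD d := rfl

theorem pyGetD_cons_succ (x : Int) (xs : List Int) (i : Int) (d : Int) (h : 0 ≤ i) :
    PySem.List.pyGetD (x :: xs) (i + 1) d = PySem.List.pyGetD xs i d := by
  rw [pyGetD_getD, pyGetD_getD, ← Int.toNat_of_nonneg h, PySem.List.pyGet?_cons_succ]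

theorem range2_step (B : Int) (hB : 0 ≤ B) :
    PySem.List.pyRange 0 (B + 1) 2 = 0 :: (PySem.List.pyRange 0 (B - 1) 2).map (· + 2) := by
  rw [PySem.List.pyRange_of_pos _ _ (by norm_num), PySem.List.pyRange_of_pos _ _ (by norm_num)]
  have h1 : (0:Int) < B + 1 := by omega
  by_cases hB1 : (0:Int) < B - 1
  · have h2 : ((B + 1 - 0 + 2 - 1) / 2).toNat = ((B - 1 - 0 + 2 - 1) / 2).toNat + 1 := by omega
    rw [if_pos h1, if_pos hB1, h2, List.range_succ_eq_map]
    simp only [List.map_cons, List.map_map]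
    refine congrArg₂ _ (by norm_num) ?_
    refine List.map_congr_left (fun a _ => ?_)
    simp only [Function.comp_apply]
    push_cast
    ring
  · have h2 : ((B + 1 - 0 + 2 - 1) / 2).toNat = 1 := by omega
    rw [if_pos h1, if_neg hB1, h2]
    norm_num

theorem fold_step (x y : Int) (t : List Int) (c : Int) :
    (PySem.List.pyRange 0 (((x :: y :: t).length : Int) - 1) 2).foldl
      (fun acc i => acc + PySem.List.pyGetD (x :: y :: t) i 0 * PySem.List.pyGetD (x :: y :: t) (i + 1) 0) c
    = (PySem.List.pyRange 0 ((t.length : Int) - 1) 2).foldl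
      (fun acc i => acc + PySem.List.pyGetD t i 0 * PySem.List.pyGetD t (i + 1) 0) (c + x * y) := by
  have hlen : (((x :: y :: t).length : Int) - 1) = (t.length : Int) + 1 := by
    simp only [List.length_cons]; push_cast; ring
  rw [hlen, range2_step _ (Int.natCast_nonneg _), List.foldl_cons, List.foldl_map]
  have hfun : ∀ (acc : Int), ∀ i ∈ PySem.List.pyRange 0 ((t.length : Int) - 1) 2,
      (fun acc i => acc + PySem.List.pyGetD (x :: y :: t) i 0 * PySem.List.pyGetD (x :: y :: t) (i + 1) 0) acc (i + 2)
      = (fun acc i => acc + PySem.List.pyGetD t i 0 * PySem.List.pyGetD t (i + 1) 0) acc i := by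
    intro acc i hi
    have h0 : 0 ≤ i := ((PySem.List.mem_pyRange_iff_of_pos (by norm_num) i).1 hi).1
    have e1 : PySem.List.pyGetD (x :: y :: t) (i + 2) 0 = PySem.List.pyGetD t i 0 := by
      rw [show i + 2 = (i + 1) + 1 by ring, pyGetD_cons_succ x (y :: t) (i + 1) 0 (by omega),
        pyGetD_cons_succ y t i 0 h0]
    have e2 : PySem.List.pyGetD (x :: y :: t) (i + 2 + 1) 0 = PySem.List.pyGetD t (i + 1) 0 := by
      rw [show i + 2 + 1 = (i + 1 + 1) + 1 by ring, pyGetD_cons_succ x (y :: t) (i + 1 + 1) 0 (by omega),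
        pyGetD_cons_succ y t (i + 1) 0 (by omega)]
    simp only [e1, e2]
  rw [PySem.List.foldl_congr_mem _ _ _ _ hfun]
  congr 1
  have e3 : PySem.List.pyGetD (x :: y :: t) (0 + 1) 0 = y := by
    rw [pyGetD_cons_succ x (y :: t) 0 0 (by norm_num), PySem.List.pyGetD_zero_cons]
  simp only [PySem.List.pyGetD_zero_cons, e3]

theorem loopA (l : List Int) : ∀ (c : Int),
    (if l.length % 2 == 1 then
      ((PySem.List.pyRange 0 ((l.length : Int) - 1) 2).foldl
        (fun acc i => acc + PySem.List.pyGetD l i 0 * PySem.List.pyGetD l (i + 1) 0) c)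
        + PySem.List.pyGetD l (-1) 0
    else
      (PySem.List.pyRange 0 ((l.length : Int) - 1) 2).foldl
        (fun acc i => acc + PySem.List.pyGetD l i 0 * PySem.List.pyGetD l (i + 1) 0) c)
    = c + pairf l := by
  induction l using pairf.induct with
  | case1 =>
    intro c
    simp only [pairf, List.length_nil, Nat.cast_zero, zero_sub, Nat.zero_mod]
    rw [show PySem.List.pyRange 0 (-1) 2 = ([] : List Int) from by decide]
    simp
  | case2 x =>
    intro c
    have hg : PySem.List.pyGetD ([x] : List Int) (-1) 0 = x := by
      rw [show ([x] : List Int) = [] ++ [x] by simp, PySem.List.pyGetD_neg_one_append_singleton]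
    simp only [pairf, List.length_cons, List.length_nil]
    norm_num
    rw [show PySem.List.pyRange 0 0 2 = ([] : List Int) from by decide]
    simp [hg]
  | case3 x y t ih =>
    intro c
    have hp : ((x :: y :: t).length % 2 == 1) = (t.length % 2 == 1) := by
      simp only [List.length_cons]
      have : (t.length + 1 + 1) % 2 = t.length % 2 := by omega
      rw [this]
    rw [fold_step, hp]
    have hpf : pairf (x :: y :: t) = x * y + pairf t := rfl
    by_cases hodd : (t.length % 2 == 1) = true
    · have ht : t ≠ [] := by
        intro h; subst h; simp at hodd
      obtain ⟨t₀, z, rfl⟩ := (List.eq_nil_or_concat t).resolve_left ht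
      simp only [List.concat_eq_append] at ih hp hpf hodd ⊢
      have hg1 : PySem.List.pyGetD (x :: y :: (t₀ ++ [z])) (-1) 0 = z := by
        rw [show x :: y :: (t₀ ++ [z]) = (x :: y :: t₀) ++ [z] by simp,
          PySem.List.pyGetD_neg_one_append_singleton]
      have hg2 : PySem.List.pyGetD (t₀ ++ [z]) (-1) 0 = z :=
        PySem.List.pyGetD_neg_one_append_singleton _ _ _
      have := ih (c + x * y)
      rw [if_pos hodd] at this ⊢
      rw [hg2] at this
      rw [hg1, hpf, this]
      ring
    · have := ih (c + x * y)
      rw [if_neg hodd] at this ⊢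
      rw [hpf, this]
      ring

-- any ≤-antisymmetric rearrangement that is descending IS sorted(xs, reverse=True)
theorem rev_desc (xs : List Int) :
    PySem.List.sorted xs (fun x => x) true = (PySem.List.sorted xs (fun x => x) false).reverse := by
  have h1 : (PySem.List.sorted xs (fun x => x) true).reverse.Pairwise (· ≤ ·) := by
    rw [List.pairwise_reverse]
    exact PySem.List.sorted_pairwise_rev xs (fun x => x)
  have h2 : (PySem.List.sorted xs (fun x => x) false).Pairwise (· ≤ ·) :=
    PySem.List.sorted_pairwise xs (fun x => x)
  have hperm : (PySem.List.sorted xs (fun x => x) true).reverse.Perm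
      (PySem.List.sorted xs (fun x => x) false) :=
    ((PySem.List.sorted xs (fun x => x) true).reverse_perm.trans
      (PySem.List.sorted_perm xs (fun x => x) true)).trans
      (PySem.List.sorted_perm xs (fun x => x) false).symm
  have := List.Perm.eq_of_pairwise
    (fun a b _ _ hab hba => le_antisymm hab hba) h1 h2 hperm
  rw [← this, List.reverse_reverse]

theorem sorted_rev_id_eq_of_perm_of_pairwise (xs ys : List Int) (hp : ys.Perm xs)
    (hpw : ys.Pairwise (fun a b => b ≤ a)) :
    PySem.List.sorted xs (fun x => x) true = ys := by
  rw [rev_desc]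
  have : PySem.List.sorted xs (fun x => x) false = ys.reverse :=
    PySem.List.sorted_id_eq_of_perm_of_pairwise xs ys.reverse
      (ys.reverse_perm.trans hp) (by rw [List.pairwise_reverse]; exact hpw)
  rw [this, List.reverse_reverse]

-- the first extremal element picked by max/min is the head of the corresponding sort
theorem pick_eq_head (useMax : Bool) (xs : List Int) (hd : Int) (tl : List Int)
    (hs : PySem.List.sorted xs (fun x => x) useMax = hd :: tl) :
    pickExtreme useMax xs = hd := by
  have hhdmem : hd ∈ xs := by
    rw [← PySem.List.mem_sorted (rev := useMax) (key := fun x => x), hs]; simp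
  have hne : xs ≠ [] := by rintro rfl; rw [(PySem.List.sorted_eq_nil_iff _ (fun x => x) _).mpr rfl] at hs; cases hs
  have hpmem := pickExtreme_mem useMax xs hne
  cases useMax
  · rcases hm : PySem.List.min? xs (fun x => x) with _ | m
    · exact absurd ((PySem.List.min?_eq_none_iff xs (fun x => x)).mp hm) hne
    · have h1 : hd ≤ m := by
        simpa using PySem.List.key_head_sorted_le xs (fun x => x) hs m (PySem.List.min?_mem hm)
      have h2 : m ≤ hd := by simpa using PySem.List.min?_isMin hm hd hhdmem
      unfold pickExtreme
      simp [hm]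
      omega
  · rcases hm : PySem.List.max? xs (fun x => x) with _ | m
    · exact absurd ((PySem.List.max?_eq_none_iff xs (fun x => x)).mp hm) hne
    · have h1 : m ≤ hd := by
        simpa using PySem.List.key_head_sorted_rev_ge xs (fun x => x) hs m (PySem.List.max?_mem hm)
      have h2 : hd ≤ m := by simpa using PySem.List.max?_isMax hm hd hhdmem
      unfold pickExtreme
      simp [hm]
      omega

-- erasing the head of the sort sorts to the tail
theorem sorted_erase_head (useMax : Bool) (xs : List Int) (hd : Int) (tl : List Int)
    (hs : PySem.List.sorted xs (fun x => x) useMax = hd :: tl) :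
    PySem.List.sorted (xs.erase hd) (fun x => x) useMax = tl := by
  have hperm : tl.Perm (xs.erase hd) := by
    have h1 : xs.Perm (hd :: tl) := by
      rw [← hs]; exact (PySem.List.sorted_perm xs (fun x => x) useMax).symm
    have h2 := h1.erase hd
    rw [List.erase_cons_head] at h2
    exact h2.symm
  cases useMax
  · have hpw : tl.Pairwise (fun a b => a ≤ b) := by
      have := PySem.List.sorted_pairwise xs (fun x => x)
      rw [hs] at this
      exact this.of_cons
    exact PySem.List.sorted_id_eq_of_perm_of_pairwise _ _ hperm hpw
  · have hpw : tl.Pairwise (fun a b => b ≤ a) := by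
      have := PySem.List.sorted_pairwise_rev xs (fun x => x)
      rw [hs] at this
      exact this.of_cons
    exact sorted_rev_id_eq_of_perm_of_pairwise _ _ hperm hpw

-- the selection loop computes the pair-sum of the corresponding sort
theorem pairUp_eq_aux (useMax : Bool) : ∀ (N : Nat) (xs : List Int) (total : Int), xs.length ≤ N →
    pairUp useMax total xs = total + pairf (PySem.List.sorted xs (fun x => x) useMax) := by
  intro N
  induction N with
  | zero =>
    intro xs total hlen
    have hnil : xs = [] := List.length_eq_zero_iff.mp (Nat.le_zero.mp hlen)
    subst hnil
    rw [pairUp, dif_neg (by simp), (PySem.List.sorted_eq_nil_iff _ (fun x => x) _).mpr rfl]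
    simp [pairf]
  | succ N ih =>
    intro xs total hlen
    by_cases h2 : 2 ≤ xs.length
    · -- the sort is a :: b :: t
      have hslen : (PySem.List.sorted xs (fun x => x) useMax).length = xs.length :=
        PySem.List.length_sorted xs (fun x => x) useMax
      rcases hsort : PySem.List.sorted xs (fun x => x) useMax with _ | ⟨a, rest⟩
      · rw [hsort] at hslen; simp at hslen; omega
      rcases rest with _ | ⟨b, t⟩
      · rw [hsort] at hslen; simp at hslen; omega
      have ha : pickExtreme useMax xs = a := pick_eq_head useMax xs a (b :: t) hsort
      have haxs : a ∈ xs := by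
        rw [← PySem.List.mem_sorted (rev := useMax) (key := fun x => x), hsort]; simp
      have hrm1 : (PySem.List.remove? xs a).getD [] = xs.erase a := by
        rw [PySem.List.remove?_eq_some_erase xs a haxs]; rfl
      have hs1 : PySem.List.sorted (xs.erase a) (fun x => x) useMax = b :: t :=
        sorted_erase_head useMax xs a (b :: t) hsort
      have hb : pickExtreme useMax (xs.erase a) = b := pick_eq_head useMax _ b t hs1
      have hbmem : b ∈ xs.erase a := by
        rw [← PySem.List.mem_sorted (rev := useMax) (key := fun x => x), hs1]; simp
      have hrm2 : (PySem.List.remove? (xs.erase a) b).getD [] = (xs.erase a).erase b := by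
        rw [PySem.List.remove?_eq_some_erase (xs.erase a) b hbmem]; rfl
      have hs2 : PySem.List.sorted ((xs.erase a).erase b) (fun x => x) useMax = t :=
        sorted_erase_head useMax (xs.erase a) b t hs1
      have hlen1 : (xs.erase a).length + 1 = xs.length := by
        have := List.length_erase_of_mem haxs
        have := List.length_pos_of_mem haxs
        omega
      have hlen2 : ((xs.erase a).erase b).length + 1 = (xs.erase a).length := by
        have := List.length_erase_of_mem hbmem
        have := List.length_pos_of_mem hbmem
        omega
      rw [pairUp, dif_pos h2]
      simp only [ha, hrm1, hb, hrm2]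
      rw [ih ((xs.erase a).erase b) (total + a * b) (by omega), hs2]
      show total + a * b + pairf t = total + (a * b + pairf t)
      ring
    · -- 0 or 1 elements left
      rcases hxs : xs with _ | ⟨x, rest⟩
      · rw [pairUp, dif_neg (by simp), (PySem.List.sorted_eq_nil_iff _ (fun x => x) _).mpr rfl]
        simp [pairf]
      rcases hrest : rest with _ | ⟨y, t⟩
      · rw [pairUp, dif_neg (by simp)]
        have hsing : PySem.List.sorted [x] (fun x => x) useMax = [x] :=
          List.perm_singleton.mp (PySem.List.sorted_perm [x] (fun x => x) useMax)
        rw [hsing]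
        simp [pairf, PySem.List.pyGetD_zero_cons]
      · rw [hxs, hrest] at h2; simp at h2

theorem pairUp_eq (useMax : Bool) (xs : List Int) (total : Int) :
    pairUp useMax total xs = total + pairf (PySem.List.sorted xs (fun x => x) useMax) :=
  pairUp_eq_aux useMax xs.length xs total le_rfl

theorem main_eq (series : List Int) : solution 0 series = solution_alt 0 series := by
  simp only [solution, solution_alt]
  rw [loopA, loopA, pairUp_eq, pairUp_eq]
  ring

-- ===== VERDICT (by name: the statement is the Claim_ definition above) =====
theorem solution_spec : Claim_equal_solution := by
  intro n series _
  unfold Spec_solution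
  have h0 : solution n series = solution 0 series := rfl
  have h1 : solution_alt n series = solution_alt 0 series := rfl
  rw [h0, h1, main_eq]
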